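-- pv_equiv track=rewrite | github.com/Lame-desu/a2sv_hub_submissions | 29-Mar-2025/Limited Repainting 321653.py | validate_p
-- ===== SOURCE A (Python) =====
-- def validate_p(strip, penalities, k, p):
--
--     flip = 0
--     opp = 0
--     for char, pen in zip(strip, penalities):
--         if char == "B" and pen > p and not flip:
--             opp += 1
--             flip = 1
--         elif char == "R" and pen > p and flip:
--             flip = 0
--
--         if opp > k:
--             return False
--     return True
-- ===== SOURCE B (Python) =====
-- def validate_p(strip, penalities, k, p):
--     pairs = list(zip(strip, penalities))
--     if not pairs:
--         return True
--     chars = "".join(c for c, pen in pairs if pen > p and c in ("B", "R"))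
--     opp = sum(1 for prev, cur in zip("R" + chars, chars) if cur == "B" and prev == "R")
--     return opp <= k
-- ===== Notes on version B (the rewrite author's own statement) =====
-- stated objective: alternative
-- what changed: Replaces A's stateful flip/opp state machine with early exit by a filter-then-count pipeline: keep only B/R characters whose penalty exceeds p, then count run starts as positions where a 'B' follows an 'R' in the sequence prefixed with 'R', and compare once with k.
import Mathlib
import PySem

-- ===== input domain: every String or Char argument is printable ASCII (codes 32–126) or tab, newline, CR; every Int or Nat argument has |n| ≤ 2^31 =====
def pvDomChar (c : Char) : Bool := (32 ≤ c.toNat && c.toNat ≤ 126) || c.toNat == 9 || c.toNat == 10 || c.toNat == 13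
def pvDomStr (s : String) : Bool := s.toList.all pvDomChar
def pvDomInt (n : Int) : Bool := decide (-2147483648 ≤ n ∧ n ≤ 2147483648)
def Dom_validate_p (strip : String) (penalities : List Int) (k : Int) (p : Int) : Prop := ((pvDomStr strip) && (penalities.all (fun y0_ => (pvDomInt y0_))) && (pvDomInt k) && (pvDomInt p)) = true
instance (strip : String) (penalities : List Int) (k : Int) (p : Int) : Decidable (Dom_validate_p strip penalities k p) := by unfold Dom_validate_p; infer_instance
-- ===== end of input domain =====

-- B replaces A's flip/opp state machine (with early exit) by a filter-then-count-run-starts pipeline; alternative decomposition, same cost.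


-- ===== PORT A =====
-- literal port of A's loop: state (flip, opp), early return False when opp > k
def validateLoop (k p : Int) : List (Char × Int) → Int → Int → Bool
  | [], _, _ => true
  | (c, pen) :: rest, flip, opp =>
    let s : Int × Int :=
      if c == 'B' && decide (pen > p) && flip == 0 then (1, opp + 1)
      else if c == 'R' && decide (pen > p) && !(flip == 0) then (0, opp)
      else (flip, opp)
    if s.2 > k then false else validateLoop k p rest s.1 s.2

def validate_p (strip : String) (penalities : List Int) (k : Int) (p : Int) : Bool :=
  validateLoop k p (strip.toList.zip penalities) 0 0

-- ===== PORT B =====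
def validate_p_alt (strip : String) (penalities : List Int) (k : Int) (p : Int) : Bool :=
  let pairs := strip.toList.zip penalities
  if pairs.isEmpty then true
  else
    let chars := (pairs.filter (fun cp => decide (cp.2 > p) && (cp.1 == 'B' || cp.1 == 'R'))).map Prod.fst
    let opp : Int := ((('R' :: chars).zip chars).filter (fun pc => pc.2 == 'B' && pc.1 == 'R')).length
    decide (opp ≤ k)

-- ===== PRECONDITION & SPEC =====
def Spec_validate_p (strip : String) (penalities : List Int) (k : Int) (p : Int) (out : Bool) : Prop := out = validate_p_alt strip penalities k p
instance (strip : String) (penalities : List Int) (k : Int) (p : Int) (out : Bool) : Decidable (Spec_validate_p strip penalities k p out) := by unfold Spec_validate_p; infer_instance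

-- ===== CLAIM (what is proved, stated in full; the proofs are below) =====
def Claim_equal_validate_p : Prop := ∀ (strip : String) (penalities : List Int) (k : Int) (p : Int), Dom_validate_p strip penalities k p → Spec_validate_p strip penalities k p (validate_p strip penalities k p)

-- ===== LEMMAS AND PROOFS =====

-- total number of increments A's loop performs from state flip
def countA (p : Int) : List (Char × Int) → Int → Int
  | [], _ => 0
  | (c, pen) :: rest, flip =>
    if c == 'B' && decide (pen > p) && flip == 0 then 1 + countA p rest 1
    else if c == 'R' && decide (pen > p) && !(flip == 0) then countA p rest 0
    else countA p rest flip

-- B's run-start count, with explicit previous character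
def countB : Char → List Char → Int
  | _, [] => 0
  | prev, c :: rest => (if c == 'B' && prev == 'R' then 1 else 0) + countB c rest

theorem countA_nonneg (p : Int) (l : List (Char × Int)) (flip : Int) : 0 ≤ countA p l flip := by
  induction l generalizing flip with
  | nil => simp [countA]
  | cons x rest ih =>
    obtain ⟨c, pen⟩ := x
    simp only [countA]
    split_ifs with h1 h2
    · have := ih 1; omega
    · exact ih 0
    · exact ih flip

theorem loop_eq (k p : Int) (l : List (Char × Int)) (flip opp : Int) :
    validateLoop k p l flip opp = if l.isEmpty then true else decide (opp + countA p l flip ≤ k) := by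
  induction l generalizing flip opp with
  | nil => simp [validateLoop]
  | cons x rest ih =>
    obtain ⟨c, pen⟩ := x
    have hn1 := countA_nonneg p rest 1
    have hn0 := countA_nonneg p rest 0
    have hnf := countA_nonneg p rest flip
    simp only [validateLoop, countA, ih, List.isEmpty_cons, Bool.false_eq_true, if_false]
    rcases rest with _ | ⟨y, rest'⟩ <;>
      split_ifs <;> simp_all [countA] <;> omega

theorem countA_eq_countB (p : Int) (l : List (Char × Int)) (flip : Int) :
    countA p l flip =
      countB (if flip == 0 then 'R' else 'B')
        ((l.filter (fun cp => decide (cp.2 > p) && (cp.1 == 'B' || cp.1 == 'R'))).map Prod.fst) := by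
  induction l generalizing flip with
  | nil => simp [countA, countB]
  | cons x rest ih =>
    obtain ⟨c, pen⟩ := x
    cases hb : (c == 'B') <;> cases hr : (c == 'R') <;> cases hd : (decide (p < pen)) <;>
      cases hf : (flip == 0) <;>
      simp [countA, countB, List.filter, hb, hr, hd, hf, ih] <;> simp_all

theorem countB_eq_zipcount (prev : Char) (l : List Char) :
    ((List.zip (prev :: l) l).filter (fun pc => pc.2 == 'B' && pc.1 == 'R')).length = countB prev l := by
  induction l generalizing prev with
  | nil => simp [countB]
  | cons c rest ih =>
    simp only [List.zip_cons_cons, List.filter, countB, ← ih c]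
    split_ifs with h <;> simp [h] <;> omega

-- ===== VERDICT (by name: the statement is the Claim_ definition above) =====
theorem validate_p_spec : Claim_equal_validate_p := by
  intro strip penalities k p _
  unfold Spec_validate_p validate_p validate_p_alt
  rcases hz : strip.toList.zip penalities with _ | ⟨x, rest⟩
  · simp [validateLoop]
  · simp only [List.isEmpty_cons, Bool.false_eq_true, if_false]
    rw [loop_eq, countA_eq_countB, countB_eq_zipcount]
    simp
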